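-- pv_equiv track=rewrite | github.com/moonbit-community/moonpython | Lib/re.py | _subn_strip_line_prefix
-- ===== SOURCE A (Python) =====
-- def _subn_strip_line_prefix(prefix, string, count=0):
--     out = []
--     i = 0
--     n = 0
--     while i <= len(string):
--         line_end = string.find("\n", i)
--         if line_end == -1:
--             line_end = len(string)
--             has_newline = False
--         else:
--             has_newline = True
--         line = string[i:line_end]
--         if line.startswith(prefix) and (count == 0 or n < count):
--             out.append(line[len(prefix) :])
--             n += 1
--         else:
--             out.append(line)
--         if not has_newline:
--             break
--         out.append("\n")
--         i = line_end + 1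
--     return "".join(out), n
-- ===== SOURCE B (Python) =====
-- def _subn_strip_line_prefix(prefix, string, count=0):
--     lines = string.split("\n")
--     matches = [i for i, line in enumerate(lines) if line.startswith(prefix)]
--     n = len(matches) if count == 0 else min(max(count, 0), len(matches))
--     for i in matches[:n]:
--         lines[i] = lines[i][len(prefix):]
--     return "\n".join(lines), n
-- ===== Notes on version B (the rewrite author's own statement) =====
-- stated objective: alternative
-- what changed: B is staged: it splits into lines, collects the indices of prefix-matching lines, computes the replacement count n in closed form (all matches, or count clamped to the number of matches), and then rewrites exactly the first n matching lines by index, instead of A's single find('\n')-driven scan that threads an incremental counter through the stripping decision of each line.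
import Mathlib
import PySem

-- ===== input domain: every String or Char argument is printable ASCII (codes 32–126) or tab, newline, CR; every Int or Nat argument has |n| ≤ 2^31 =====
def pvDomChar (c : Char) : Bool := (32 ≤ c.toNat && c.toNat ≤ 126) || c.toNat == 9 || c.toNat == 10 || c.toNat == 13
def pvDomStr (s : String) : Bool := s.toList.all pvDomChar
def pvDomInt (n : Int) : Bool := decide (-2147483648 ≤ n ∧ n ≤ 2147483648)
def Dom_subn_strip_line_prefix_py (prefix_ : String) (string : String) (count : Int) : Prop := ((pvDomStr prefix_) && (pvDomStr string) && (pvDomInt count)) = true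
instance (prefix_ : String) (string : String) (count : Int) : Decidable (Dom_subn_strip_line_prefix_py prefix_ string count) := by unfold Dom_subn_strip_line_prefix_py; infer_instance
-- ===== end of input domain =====

-- B is staged: split into lines, collect the matching line indices, compute the
-- replacement count n in closed form, then rewrite the first n matching lines by
-- index — instead of A's find('\n')-driven scan threading an incremental counter
-- (objective: alternative; same cost).

-- ===== PORT A =====
-- A's while-loop: i scans forward with string.find('\n', i); fuel is only a totality
-- guard (the loop passes one '\n' per iteration, so len+1 fuel always suffices).
def pyALoop (pre s : List Char) (count : Int) : Nat → Nat → List (List Char) → Int → List (List Char) × Int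
  | 0, _, out, n => (out, n)
  | fuel + 1, i, out, n =>
    if i ≤ s.length then
      let le := PySem.Chars.findFrom s ['\n'] (i : Int)
      let lineEnd : Nat := if le = -1 then s.length else le.toNat
      let line := PySem.Chars.slice s (some (i : Int)) (some (lineEnd : Int))
      let r :=
        if PySem.Chars.startswith line pre && (count == 0 || decide (n < count)) then
          (out ++ [PySem.Chars.slice line (some (pre.length : Int)) none], n + 1)
        else (out ++ [line], n)
      if le = -1 then r
      else pyALoop pre s count fuel (lineEnd + 1) (r.1 ++ [['\n']]) r.2
    else (out, n)

def subn_strip_line_prefix_py (prefix_ : String) (string : String) (count : Int) : String × Int :=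
  let r := pyALoop prefix_.toList string.toList count (string.toList.length + 1) 0 [] 0
  (String.ofList (PySem.Chars.join [] r.1), r.2)

-- ===== PORT B =====
def subn_strip_line_prefix_py_alt (prefix_ : String) (string : String) (count : Int) : String × Int :=
  let lines := PySem.Chars.splitOn string.toList ['\n']
  let matched := ((PySem.List.enumerate lines 0).filter
      (fun p => PySem.Chars.startswith p.2 prefix_.toList)).map Prod.fst
  let n : Int := if count == 0 then (matched.length : Int) else min (max count 0) (matched.length : Int)
  let lines := (PySem.List.slice matched none (some n)).foldl
      (fun acc i => PySem.List.pySetD acc i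
        (PySem.Chars.slice (PySem.List.pyGetD acc i []) (some (prefix_.toList.length : Int)) none)) lines
  (String.ofList (PySem.Chars.join ['\n'] lines), n)

-- ===== PRECONDITION & SPEC =====
def Spec_subn_strip_line_prefix_py (prefix_ : String) (string : String) (count : Int) (out : String × Int) : Prop := out = subn_strip_line_prefix_py_alt prefix_ string count
instance (prefix_ : String) (string : String) (count : Int) (out : String × Int) : Decidable (Spec_subn_strip_line_prefix_py prefix_ string count out) := by unfold Spec_subn_strip_line_prefix_py; infer_instance

-- ===== CLAIM (what is proved, stated in full; the proofs are below) =====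
def Claim_equal_subn_strip_line_prefix_py : Prop := ∀ (prefix_ : String) (string : String) (count : Int), Dom_subn_strip_line_prefix_py prefix_ string count → Spec_subn_strip_line_prefix_py prefix_ string count (subn_strip_line_prefix_py prefix_ string count)

-- ===== LEMMAS AND PROOFS =====

-- the list of lines of t, split at every '\n' (structural form both ports reduce to)
def pvLines : List Char → List (List Char)
  | [] => [[]]
  | c :: rest =>
    if c = '\n' then [] :: pvLines rest
    else
      match pvLines rest with
      | [] => [[c]]
      | l :: ls => (c :: l) :: ls

-- strip the prefix from the first (at most) k matching lines
def stripK (pre : List Char) : Nat → List (List Char) → List (List Char)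
  | _, [] => []
  | k, l :: ls =>
    if PySem.Chars.startswith l pre then
      match k with
      | 0 => l :: stripK pre 0 ls
      | k' + 1 => PySem.Chars.slice l (some (pre.length : Int)) none :: stripK pre k' ls
    else l :: stripK pre k ls

-- number of matching lines
def pvMC (pre : List Char) (parts : List (List Char)) : Nat :=
  parts.countP (fun l => PySem.Chars.startswith l pre)

-- indices of matching lines
def pvMatchIdx (pre : List Char) : List (List Char) → List Nat
  | [] => []
  | l :: ls =>
    if PySem.Chars.startswith l pre then 0 :: (pvMatchIdx pre ls).map (· + 1)
    else (pvMatchIdx pre ls).map (· + 1)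

-- A's per-line pass: strip the prefix from each qualifying line, counting
def pvCore (pre : List Char) (count : Int) : List (List Char) → Int → List (List Char) × Int
  | [], n => ([], n)
  | l :: ls, n =>
    if PySem.Chars.startswith l pre && (count == 0 || decide (n < count)) then
      let r := pvCore pre count ls (n + 1)
      (PySem.Chars.slice l (some (pre.length : Int)) none :: r.1, r.2)
    else
      let r := pvCore pre count ls n
      (l :: r.1, r.2)

def pvConsHead (p : List Char) : List (List Char) → List (List Char)
  | [] => [p]
  | x :: xs => (p ++ x) :: xs

lemma pvLines_ne_nil (t : List Char) : pvLines t ≠ [] := by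
  cases t with
  | nil => simp [pvLines]
  | cons c rest =>
    simp only [pvLines]
    split_ifs
    · simp
    · cases h : pvLines rest <;> simp

lemma pvGo_eq (l : List Char) : ∀ (fuel : Nat) (cur : List Char) (acc : List (List Char)),
    l.length < fuel →
    PySem.Chars.splitOn.go ['\n'] fuel l cur acc = acc.reverse ++ pvConsHead cur.reverse (pvLines l) := by
  induction l with
  | nil =>
    intro fuel cur acc h
    cases fuel with
    | zero => omega
    | succ f => simp [PySem.Chars.splitOn.go, pvLines, pvConsHead]
  | cons c rest ih =>
    intro fuel cur acc h
    cases fuel with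
    | zero => omega
    | succ f =>
      by_cases hc : c = '\n'
      · subst hc
        have hpre : List.isPrefixOf ['\n'] ('\n' :: rest) = true := by
          simp [List.isPrefixOf]
        rw [PySem.Chars.splitOn.go]
        simp only [hpre, if_pos, List.length_singleton, List.drop_one, List.tail_cons]
        rw [ih f [] (cur.reverse :: acc) (by simpa using Nat.lt_of_succ_lt_succ h)]
        obtain ⟨x, xs, hx⟩ := List.exists_cons_of_ne_nil (pvLines_ne_nil rest)
        simp [pvLines, hx, pvConsHead]
      · have hpre : List.isPrefixOf ['\n'] (c :: rest) = false := by
          simp [List.isPrefixOf]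
          exact fun hcn => hc hcn.symm
        rw [PySem.Chars.splitOn.go]
        simp only [hpre, Bool.false_eq_true, if_false]
        rw [ih f (c :: cur) acc (by simpa using Nat.lt_of_succ_lt_succ h)]
        obtain ⟨x, xs, hx⟩ := List.exists_cons_of_ne_nil (pvLines_ne_nil rest)
        simp [pvLines, hx, hc, pvConsHead]

lemma pvSplitOn_eq (s : List Char) : PySem.Chars.splitOn s ['\n'] = pvLines s := by
  rw [PySem.Chars.splitOn, pvGo_eq s (s.length + 1) [] [] (by omega)]
  obtain ⟨x, xs, hx⟩ := List.exists_cons_of_ne_nil (pvLines_ne_nil s)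
  simp [hx, pvConsHead]

lemma pvLines_of_not_mem {t : List Char} (h : '\n' ∉ t) : pvLines t = [t] := by
  induction t with
  | nil => simp [pvLines]
  | cons c rest ih =>
    have hc : c ≠ '\n' := by intro hc; exact h (hc ▸ List.mem_cons_self)
    have hr : '\n' ∉ rest := fun hm => h (List.mem_cons_of_mem _ hm)
    simp [pvLines, hc, ih hr]

lemma pvLines_append {a b : List Char} (h : '\n' ∉ a) :
    pvLines (a ++ '\n' :: b) = a :: pvLines b := by
  induction a with
  | nil => simp [pvLines]
  | cons c rest ih =>
    have hc : c ≠ '\n' := by intro hc; exact h (hc ▸ List.mem_cons_self)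
    have hr : '\n' ∉ rest := fun hm => h (List.mem_cons_of_mem _ hm)
    simp [pvLines, hc, ih hr]

lemma pvInfix_of_mem {t : List Char} (h : '\n' ∈ t) : ['\n'] <:+: t := by
  obtain ⟨u, v, huv⟩ := List.append_of_mem h
  exact ⟨u, v, by simp [huv]⟩

lemma pvCore_fst_ne_nil (pre : List Char) (count : Int) (l : List Char) (ls : List (List Char)) (n : Int) :
    (pvCore pre count (l :: ls) n).1 ≠ [] := by
  simp only [pvCore]
  split_ifs <;> simp

lemma pvFlatten_intersperse_nil (xs : List (List Char)) :
    (List.intersperse ([] : List Char) xs).flatten = xs.flatten := by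
  induction xs with
  | nil => simp
  | cons a tl ih =>
    cases tl with
    | nil => simp
    | cons b t =>
      rw [List.intersperse_cons₂]
      simp [ih]

lemma pvJoin_nil_intersperse (ls : List (List Char)) :
    PySem.Chars.join [] (List.intersperse ['\n'] ls) = PySem.Chars.join ['\n'] ls := by
  simp only [PySem.Chars.join, List.intercalate]
  exact pvFlatten_intersperse_nil _

lemma pvALoop_eq (pre s : List Char) (count : Int) :
    ∀ (fuel k : Nat) (out : List (List Char)) (n : Int), k ≤ s.length → s.length - k < fuel →
    pyALoop pre s count fuel k out n
      = (out ++ List.intersperse ['\n'] (pvCore pre count (pvLines (s.drop k)) n).1,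
         (pvCore pre count (pvLines (s.drop k)) n).2) := by
  intro fuel
  induction fuel with
  | zero => intro k out n hk hf; omega
  | succ f ih =>
    intro k out n hk hf
    have hfind := PySem.Chars.findFrom_natCast s ['\n'] k hk
    by_cases hnone : PySem.Chars.find (s.drop k) ['\n'] = -1
    -- no newline from k on: last line
    · have hnm : '\n' ∉ s.drop k := by
        intro hm
        exact ((PySem.Chars.find_eq_neg_one_iff _ _).1 hnone) (pvInfix_of_mem hm)
      have hline : PySem.List.slice s (some (k : Int)) (some (s.length : Int))
          = s.drop k := by
        have := PySem.List.slice_natCast s k s.length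
        rw [this, List.take_of_length_le (by simp)]
      rw [pvLines_of_not_mem hnm]
      simp only [pyALoop, hk, if_pos, hfind, hnone, PySem.Chars.slice, pvCore]
      norm_num [hline]
      split_ifs <;> simp_all
    -- a newline at absolute position k + j
    · have h0 : 0 ≤ PySem.Chars.find (s.drop k) ['\n'] := by
        have := PySem.Chars.neg_one_le_find (s.drop k) ['\n']
        omega
      have hspec := PySem.Chars.find_spec h0
      obtain ⟨rest0, hr0⟩ := hspec.1
      set j := (PySem.Chars.find (s.drop k) ['\n']).toNat with hjdef
      have hjlt : j < (s.drop k).length := by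
        have h2 := congrArg List.length hr0
        simp at h2
        simp only [List.length_drop]
        omega
      have hjlen : k + j < s.length := by
        have := List.length_drop (l := s) (i := k)
        omega
      have htj : (s.drop k).drop (j + 1) = rest0 := by
        have h1 : ((s.drop k).drop j).drop 1 = (s.drop k).drop (j + 1) := by
          rw [List.drop_drop]
        rw [← h1, ← hr0]
        simp
      have hdropj : (s.drop k).drop j = '\n' :: (s.drop k).drop (j + 1) := by
        rw [htj, ← hr0]; simp
      have hsplit : s.drop k = (s.drop k).take j ++ '\n' :: (s.drop k).drop (j + 1) := by
        conv_lhs => rw [← List.take_append_drop j (s.drop k)]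
        rw [hdropj]
      have hnm : '\n' ∉ (s.drop k).take j := by
        intro hm
        obtain ⟨i, hi, hgi⟩ := List.mem_iff_getElem.1 hm
        have hij : i < j := by simpa using (lt_of_lt_of_le hi (by simp))
        have hilen : i < (s.drop k).length := by omega
        refine hspec.2 i (by omega) ⟨(s.drop k).drop (i + 1), ?_⟩
        rw [List.drop_eq_getElem_cons hilen]
        simp only [List.getElem_take] at hgi
        simp [hgi]
      have hlines : pvLines (s.drop k) = (s.drop k).take j :: pvLines ((s.drop k).drop (j + 1)) := by
        conv_lhs => rw [hsplit]
        exact pvLines_append hnm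
      have hne : (k : Int) + PySem.Chars.find (s.drop k) ['\n'] ≠ -1 := by omega
      have htn : ((k : Int) + PySem.Chars.find (s.drop k) ['\n']).toNat = k + j := by omega
      have hline : PySem.List.slice s (some (k : Int)) (some ((k + j : Nat) : Int))
          = (s.drop k).take j := by
        rw [PySem.List.slice_natCast s k (k + j)]
        congr 1
        omega
      have hdropnext : s.drop (k + j + 1) = (s.drop k).drop (j + 1) := by
        rw [List.drop_drop]
        congr 1
      simp only [pyALoop, hk, if_pos, hfind, hnone, if_false, hne, PySem.Chars.slice, htn]
      rw [ih (k + j + 1) _ _ (by omega) (by omega), hdropnext, hlines]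
      simp only [hline]
      obtain ⟨y, ys, hys⟩ := List.exists_cons_of_ne_nil (pvLines_ne_nil ((s.drop k).drop (j + 1)))
      simp only [pvCore]
      split_ifs with hcond
      · obtain ⟨z, zs, hz⟩ := List.exists_cons_of_ne_nil
          (pvCore_fst_ne_nil pre count y ys (n + 1))
        rw [hys]
        simp only [hz, List.intersperse_cons₂]
        simp
      · obtain ⟨z, zs, hz⟩ := List.exists_cons_of_ne_nil
          (pvCore_fst_ne_nil pre count y ys n)
        rw [hys]
        simp only [hz, List.intersperse_cons₂]
        simp

-- ---- characterizing pvCore (A's pass) by stripK ----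

lemma stripK_zero (pre : List Char) (parts : List (List Char)) :
    stripK pre 0 parts = parts := by
  induction parts with
  | nil => rfl
  | cons l ls ih => simp only [stripK]; split_ifs <;> simp [ih]

lemma pvCore_zero (pre : List Char) (parts : List (List Char)) :
    ∀ n, pvCore pre 0 parts n = (stripK pre (pvMC pre parts) parts, n + (pvMC pre parts : Int)) := by
  induction parts with
  | nil => intro n; simp [pvCore, stripK, pvMC]
  | cons l ls ih =>
    intro n
    by_cases hsw : PySem.Chars.startswith l pre = true
    · have hmc : pvMC pre (l :: ls) = pvMC pre ls + 1 := by
        simp [pvMC, List.countP_cons, hsw]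
      simp only [pvCore, hsw, Bool.true_and, BEq.rfl, Bool.true_or, if_pos, ih (n + 1),
        hmc, stripK]
      rw [Prod.mk.injEq]
      exact ⟨rfl, by push_cast; ring⟩
    · have hmc : pvMC pre (l :: ls) = pvMC pre ls := by
        simp [pvMC, List.countP_cons, hsw]
      simp only [pvCore, hsw, Bool.false_and, Bool.false_eq_true, if_false, ih n, hmc, stripK]

lemma pvCore_nz (pre : List Char) (count : Int) (hc : count ≠ 0) (parts : List (List Char)) :
    ∀ n, pvCore pre count parts n
      = (stripK pre (count - n).toNat parts,
         n + (min (count - n).toNat (pvMC pre parts) : Int)) := by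
  induction parts with
  | nil => intro n; simp [pvCore, stripK, pvMC]
  | cons l ls ih =>
    intro n
    have hc' : (count == 0) = false := by simpa using hc
    by_cases hsw : PySem.Chars.startswith l pre = true
    · have hmc : pvMC pre (l :: ls) = pvMC pre ls + 1 := by
        simp [pvMC, List.countP_cons, hsw]
      by_cases hlt : n < count
      · have hk : (count - n).toNat = (count - (n + 1)).toNat + 1 := by omega
        simp only [pvCore, hsw, hc', Bool.true_and, Bool.false_or, decide_eq_true_eq, hlt,
          if_pos, ih (n + 1), hmc, hk, stripK]
        rw [Prod.mk.injEq]
        exact ⟨rfl, by push_cast; omega⟩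
      · have hk : (count - n).toNat = 0 := by omega
        simp only [pvCore, hsw, hc', Bool.true_and, Bool.false_or, decide_eq_true_eq, hlt,
          if_false, ih n, hmc, hk, stripK]
        simp only [if_pos]
        rw [Prod.mk.injEq]
        exact ⟨rfl, by push_cast; omega⟩
    · have hmc : pvMC pre (l :: ls) = pvMC pre ls := by
        simp [pvMC, List.countP_cons, hsw]
      simp only [pvCore, hsw, Bool.false_and, Bool.false_eq_true, if_false, ih n, hmc, stripK]

lemma stripK_min (pre : List Char) : ∀ (k : Nat) (parts : List (List Char)),
    stripK pre (min k (pvMC pre parts)) parts = stripK pre k parts := by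
  intro k parts
  induction parts generalizing k with
  | nil => rfl
  | cons l ls ih =>
    by_cases hsw : PySem.Chars.startswith l pre = true
    · have hmc : pvMC pre (l :: ls) = pvMC pre ls + 1 := by
        simp [pvMC, List.countP_cons, hsw]
      cases k with
      | zero => simp [hmc]
      | succ k' =>
        have : min (k' + 1) (pvMC pre (l :: ls)) = min k' (pvMC pre ls) + 1 := by
          rw [hmc]; omega
        rw [this]
        simp only [stripK, hsw, if_pos, ih k']
    · have hmc : pvMC pre (l :: ls) = pvMC pre ls := by
        simp [pvMC, List.countP_cons, hsw]
      rw [hmc]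
      simp only [stripK, hsw, Bool.false_eq_true, if_false, ih k]

-- ---- characterizing B's staged pipeline ----

lemma pvMatchIdx_length (pre : List Char) (parts : List (List Char)) :
    (pvMatchIdx pre parts).length = pvMC pre parts := by
  induction parts with
  | nil => rfl
  | cons l ls ih =>
    have ih' : (pvMatchIdx pre ls).length = List.countP (fun l => PySem.Chars.startswith l pre) ls := ih
    by_cases hsw : PySem.Chars.startswith l pre = true <;>
      simp [pvMatchIdx, pvMC, List.countP_cons, hsw, ih']

lemma pvCastShift (s : Int) (idxs : List Nat) :
    (idxs.map (· + 1)).map (fun k : Nat => s + (k : Int))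
      = idxs.map (fun k : Nat => (s + 1) + (k : Int)) := by
  rw [List.map_map]
  apply List.map_congr_left
  intro k _
  simp only [Function.comp]
  push_cast
  ring

lemma pvEnum_filter_eq (pre : List Char) (parts : List (List Char)) :
    ∀ s : Int, ((PySem.List.enumerate parts s).filter
        (fun p => PySem.Chars.startswith p.2 pre)).map Prod.fst
      = (pvMatchIdx pre parts).map (fun (k : Nat) => s + (k : Int)) := by
  induction parts with
  | nil => intro s; simp [PySem.List.enumerate_nil, pvMatchIdx]
  | cons l ls ih =>
    intro s
    rw [PySem.List.enumerate_cons, List.filter_cons]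
    by_cases hsw : PySem.Chars.startswith l pre = true
    · rw [if_pos (by simpa using hsw), List.map_cons, ih (s + 1)]
      simp only [pvMatchIdx, hsw, if_pos, List.map_cons, pvCastShift, Nat.cast_zero, add_zero]
    · rw [if_neg (by simpa using hsw), ih (s + 1)]
      simp only [pvMatchIdx, hsw, Bool.false_eq_true, if_false, pvCastShift]

-- shifting all indices by one acts on the tail
lemma pvFold_shift (strip : List Char → List Char) (idxs : List Nat) :
    ∀ (a : List Char) (xs : List (List Char)),
    (idxs.map (· + 1)).foldl (fun acc k => acc.set k (strip (acc.getD k []))) (a :: xs)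
      = a :: idxs.foldl (fun acc k => acc.set k (strip (acc.getD k []))) xs := by
  induction idxs with
  | nil => intro a xs; simp
  | cons i is ih =>
    intro a xs
    simp only [List.map_cons, List.foldl_cons, List.getD_cons_succ, List.set_cons_succ]
    exact ih a _

lemma pvFold_take_eq (pre : List Char) : ∀ (parts : List (List Char)) (t : Nat),
    ((pvMatchIdx pre parts).take t).foldl
        (fun acc k => acc.set k (PySem.Chars.slice (acc.getD k [])
          (some (pre.length : Int)) none)) parts
      = stripK pre t parts := by
  intro parts
  induction parts with
  | nil => intro t; simp [pvMatchIdx, stripK]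
  | cons l ls ih =>
    intro t
    by_cases hsw : PySem.Chars.startswith l pre = true
    · cases t with
      | zero => simp [stripK_zero]
      | succ t' =>
        simp only [pvMatchIdx, hsw, if_pos, List.take_succ_cons, List.foldl_cons,
          List.getD_cons_zero, List.set_cons_zero, ← List.map_take, stripK]
        rw [pvFold_shift (fun x => PySem.Chars.slice x (some (pre.length : Int)) none), ih t']
    · simp only [pvMatchIdx, hsw, Bool.false_eq_true, if_false, ← List.map_take, stripK]
      rw [pvFold_shift (fun x => PySem.Chars.slice x (some (pre.length : Int)) none), ih t]

-- B's staged pipeline on the list of lines, reduced to pvCore (A's pass)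
lemma pvAlt_core (pre : List Char) (count : Int) (lines : List (List Char))
    (ms : List Int) (n : Int)
    (hms : ms = ((PySem.List.enumerate lines 0).filter
        (fun p => PySem.Chars.startswith p.2 pre)).map Prod.fst)
    (hn : n = if count == 0 then (ms.length : Int) else min (max count 0) (ms.length : Int)) :
    ((PySem.List.slice ms none (some n)).foldl
        (fun acc i => PySem.List.pySetD acc i
          (PySem.Chars.slice (PySem.List.pyGetD acc i []) (some (pre.length : Int)) none)) lines, n)
      = pvCore pre count lines 0 := by
  have hm : ms = (pvMatchIdx pre lines).map (fun (k : Nat) => (k : Int)) := by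
    rw [hms, pvEnum_filter_eq pre lines 0]
    exact List.map_congr_left (fun k _ => zero_add _)
  have hlen : ms.length = pvMC pre lines := by
    rw [hm, List.length_map, pvMatchIdx_length]
  have hn0 : 0 ≤ n := by
    rw [hn]; split_ifs
    · exact Int.natCast_nonneg _
    · exact le_min (le_max_right _ _) (Int.natCast_nonneg _)
  rw [PySem.List.slice_to _ hn0, hm, ← List.map_take, List.foldl_map]
  simp only [PySem.List.pySetD_natCast, PySem.List.pyGetD_natCast]
  rw [pvFold_take_eq pre lines n.toNat]
  by_cases hc : count = 0
  · subst hc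
    have hnv : n = (pvMC pre lines : Int) := by
      rw [hn, hlen]; simp
    rw [pvCore_zero pre lines 0, hnv]
    simp
  · have hc' : (count == 0) = false := by simpa using hc
    have hnv : n = min (max count 0) (pvMC pre lines : Int) := by rw [hn, hlen, hc']; simp
    have hnt : n.toNat = min count.toNat (pvMC pre lines) := by
      rw [hnv]; omega
    rw [pvCore_nz pre count hc lines 0]
    simp only [sub_zero]
    refine Prod.ext ?_ ?_
    · rw [hnt]
      exact stripK_min pre count.toNat lines
    · simp only [zero_add]
      omega

-- ===== VERDICT (by name: the statement is the Claim_ definition above) =====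
theorem subn_strip_line_prefix_py_spec : Claim_equal_subn_strip_line_prefix_py := by
  intro prefix_ string count _
  unfold Spec_subn_strip_line_prefix_py
  simp only [subn_strip_line_prefix_py, subn_strip_line_prefix_py_alt]
  rw [pvALoop_eq prefix_.toList string.toList count (string.toList.length + 1) 0 [] 0
      (by omega) (by omega)]
  simp only [List.drop_zero, List.nil_append, pvSplitOn_eq]
  have h := pvAlt_core prefix_.toList count (pvLines string.toList) _ _ rfl rfl
  rw [← h]
  simp [pvJoin_nil_intersperse]
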